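-- pv_equiv track=rewrite | github.com/Kaiho1618/MicroscopeController | service/image_process_service.py | _reorder_images_zigzag
-- ===== SOURCE A (Python) =====
-- from typing import Dict, Any, List, Tuple
--
-- def _reorder_images_zigzag(images: List[Any], grid_x: int, grid_y: int) -> List[Any]:
--     """
--     Reorder images from zigzag capture order to grid coordinate order
--
--     Example:
--     123
--     654
--     789
--     to
--     123
--     456
--     789
--     """
--     if len(images) != grid_x * grid_y:
--         raise ValueError(f"Expected {grid_x * grid_y} images, got {len(images)}")
--
--     reordered_images = [None] * (grid_x * grid_y)
--
--     for y in range(grid_y):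
--         for x in range(grid_x):
--             if y % 2 == 0:
--                 zigzag_index = y * grid_x + x
--             else:
--                 zigzag_index = y * grid_x + (grid_x - 1 - x)
--
--             grid_index = y * grid_x + x
--             reordered_images[grid_index] = images[zigzag_index]
--
--     return reordered_images
-- ===== SOURCE B (Python) =====
-- def _reorder_images_zigzag(images, grid_x, grid_y):
--     if len(images) != grid_x * grid_y:
--         raise ValueError(f"Expected {grid_x * grid_y} images, got {len(images)}")
--     reordered = []
--     for y in range(grid_y):
--         row = images[y * grid_x:(y + 1) * grid_x]
--         reordered += row[::-1] if y % 2 == 1 else row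
--     return reordered
-- ===== Notes on version B (the rewrite author's own statement) =====
-- stated objective: simpler
-- what changed: Replaces the per-cell modulo index arithmetic scattered into a preallocated buffer with row slices that are conditionally reversed and concatenated in one pass.
-- outside the precondition, e.g. on _reorder_images_zigzag([1, 2, 3, 4], -2, -2): A returns [None, None, None, None], B returns []
import Mathlib
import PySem

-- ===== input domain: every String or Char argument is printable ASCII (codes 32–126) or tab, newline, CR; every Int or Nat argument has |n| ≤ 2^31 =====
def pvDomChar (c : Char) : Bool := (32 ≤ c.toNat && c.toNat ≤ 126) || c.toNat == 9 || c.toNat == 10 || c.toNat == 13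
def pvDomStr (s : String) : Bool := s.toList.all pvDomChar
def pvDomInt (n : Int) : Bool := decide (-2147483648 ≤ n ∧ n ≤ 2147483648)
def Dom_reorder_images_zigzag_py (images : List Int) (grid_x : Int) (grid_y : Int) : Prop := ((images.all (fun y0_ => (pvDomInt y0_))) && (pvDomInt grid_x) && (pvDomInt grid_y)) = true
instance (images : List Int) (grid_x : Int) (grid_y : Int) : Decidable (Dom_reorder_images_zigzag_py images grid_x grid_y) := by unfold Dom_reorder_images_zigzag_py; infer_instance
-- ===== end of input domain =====

-- B replaces A's per-cell modulo index arithmetic and scatter-assignment into a preallocated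
-- buffer by chunking the input into row slices, reversing odd rows, and concatenating (objective: simpler).


-- ===== PORT A =====
-- Literal port of A. The up-front length check (ValueError) is excluded by Pre_; the buffer of
-- None cells is List (Option Int), and the final `.map (·.getD 0)` extracts the ints — under
-- Pre_ every cell has been assigned `some _`, so the default 0 is never the result.
def reorder_images_zigzag_py (images : List Int) (grid_x : Int) (grid_y : Int) : List Int :=
  let init : List (Option Int) := List.replicate (grid_x * grid_y).toNat none
  let buf :=
    (PySem.List.pyRange 0 grid_y 1).foldl (fun buf y =>
      (PySem.List.pyRange 0 grid_x 1).foldl (fun buf x =>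
        let zigzag_index : Int :=
          if PySem.Int.mod y 2 == 0 then y * grid_x + x
          else y * grid_x + (grid_x - 1 - x)
        let grid_index : Int := y * grid_x + x
        PySem.List.pySetD buf grid_index (PySem.List.pyGet? images zigzag_index)) buf) init
  buf.map (fun o => o.getD 0)

-- ===== PORT B =====
-- Literal port of B: chunk into row slices, reverse odd rows ([::-1]), concatenate.
def reorder_images_zigzag_py_alt (images : List Int) (grid_x : Int) (grid_y : Int) : List Int :=
  (PySem.List.pyRange 0 grid_y 1).foldl (fun reordered y =>
    let row := PySem.List.slice images (some (y * grid_x)) (some ((y + 1) * grid_x))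
    reordered ++ (if PySem.Int.mod y 2 == 1 then row.reverse else row)) []

-- ===== PRECONDITION & SPEC =====
-- Pre_ excludes (a) inputs where A raises ValueError (length ≠ grid_x*grid_y), and
-- (b) inputs with grid_y < 0 and nonempty images, where A returns a list of None —
-- not a value of the declared element type (B returns [] there).
def Pre_reorder_images_zigzag_py (images : List Int) (grid_x : Int) (grid_y : Int) : Prop :=
  (images.length : Int) = grid_x * grid_y ∧ (0 ≤ grid_y ∨ images = [])
instance (images : List Int) (grid_x : Int) (grid_y : Int) : Decidable (Pre_reorder_images_zigzag_py images grid_x grid_y) := by unfold Pre_reorder_images_zigzag_py; infer_instance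
def pvWitness_reorder_images_zigzag_py : List Int × Int × Int := ([1, 2, 3, 6, 5, 4], 3, 2)

def Spec_reorder_images_zigzag_py (images : List Int) (grid_x : Int) (grid_y : Int) (out : List Int) : Prop := out = reorder_images_zigzag_py_alt images grid_x grid_y
instance (images : List Int) (grid_x : Int) (grid_y : Int) (out : List Int) : Decidable (Spec_reorder_images_zigzag_py images grid_x grid_y out) := by unfold Spec_reorder_images_zigzag_py; infer_instance

-- ===== CLAIM (what is proved, stated in full; the proofs are below) =====
def Claim_equal_reorder_images_zigzag_py : Prop := ∀ (images : List Int) (grid_x : Int) (grid_y : Int), Dom_reorder_images_zigzag_py images grid_x grid_y → Pre_reorder_images_zigzag_py images grid_x grid_y → Spec_reorder_images_zigzag_py images grid_x grid_y (reorder_images_zigzag_py images grid_x grid_y)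

-- ===== LEMMAS AND PROOFS =====

-- Python's `y % 2` on a nonnegative y is plain Nat mod
theorem pv_mod2 (y : Nat) : PySem.Int.mod (y : Int) 2 = ((y % 2 : Nat) : Int) := by
  simp [PySem.Int.mod, Int.fmod_eq_emod]

-- one pass of scatter-assignments over a contiguous segment rewrites exactly that segment
theorem pv_foldl_set_range {α : Type} (g : Nat → α) : ∀ (n s : Nat) (buf : List α), s + n ≤ buf.length →
    (List.range n).foldl (fun b x => b.set (s + x) (g x)) buf
      = buf.take s ++ (List.range n).map g ++ buf.drop (s + n) := by
  intro n
  induction n with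
  | zero => intro s buf h; simp
  | succ n ih =>
    intro s buf h
    rw [List.range_succ, List.foldl_append, List.foldl_cons, List.foldl_nil,
        ih s buf (by omega)]
    have hts : (List.take s buf).length = s := by rw [List.length_take]; omega
    have htm : (List.map g (List.range n)).length = n := by simp
    rw [List.append_assoc, List.set_append_right _ _ (by omega),
        List.set_append_right _ _ (by omega), hts, htm,
        List.drop_eq_getElem_cons (show s + n < buf.length by omega),
        show s + n - s - n = 0 from by omega, List.set_cons_zero]
    simp [show s + (n + 1) = s + n + 1 by omega]

-- gathering a contiguous segment by index equals slicing it
theorem pv_map_range_get {α : Type} (xs : List α) (s n : Nat) (h : s + n ≤ xs.length) :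
    (List.range n).map (fun x => xs[s + x]?) = ((xs.drop s).take n).map some := by
  apply List.ext_getElem
  · simp; omega
  · intro k h1 h2
    simp only [List.length_map, List.length_range] at h1
    simp only [List.getElem_map, List.getElem_range, List.getElem_take, List.getElem_drop]
    rw [List.getElem?_eq_getElem (by omega)]

-- traversing indices back-to-front reverses the gathered list
theorem pv_map_rev {α : Type} (f : Nat → α) (n : Nat) :
    (List.range n).map (fun x => f (n - 1 - x)) = ((List.range n).map f).reverse := by
  apply List.ext_getElem
  · simp
  · intro k h1 h2
    simp [List.getElem_reverse]

theorem pv_flatMap_congr {α β : Type} (l : List α) (f g : α → List β)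
    (h : ∀ x ∈ l, f x = g x) : l.flatMap f = l.flatMap g := by
  induction l with
  | nil => rfl
  | cons a l ih =>
    rw [List.flatMap_cons, List.flatMap_cons, h a (by simp),
        ih (fun x hx => h x (by simp [hx]))]

-- the zigzag source row for grid row y, as optional values
def pvRowOpt (images : List Int) (gx y : Nat) : List (Option Int) :=
  (List.range gx).map (fun x =>
    images[(if y % 2 = 0 then y * gx + x else y * gx + (gx - 1 - x))]?)

-- buffer invariant of A's outer loop: after k rows, the first k segments are filled
theorem pv_bufInv (images : List Int) (gx gy : Nat) :
    ∀ (k : Nat), k ≤ gy →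
    (List.range k).foldl (fun buf y => (List.range gx).foldl (fun b x =>
        b.set (y * gx + x)
          (images[(if y % 2 = 0 then y * gx + x else y * gx + (gx - 1 - x))]?)) buf)
      (List.replicate (gx * gy) (none : Option Int))
    = (List.range k).flatMap (pvRowOpt images gx)
        ++ List.replicate ((gy - k) * gx) (none : Option Int) := by
  intro k
  induction k with
  | zero => intro _; simp [Nat.mul_comm]
  | succ k ih =>
    intro hk
    have hflen : ((List.range k).flatMap (pvRowOpt images gx)).length = k * gx := by
      simp [List.length_flatMap, pvRowOpt, List.map_const']
    rw [List.range_succ, List.foldl_append, List.foldl_cons, List.foldl_nil, ih (by omega)]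
    have hmul : k * gx ≤ gy * gx := Nat.mul_le_mul_right gx (by omega)
    have hmul1 : (k + 1) * gx ≤ gy * gx := Nat.mul_le_mul_right gx hk
    have hbl : ((List.range k).flatMap (pvRowOpt images gx)
        ++ List.replicate ((gy - k) * gx) (none : Option Int)).length = gy * gx := by
      simp [hflen, Nat.sub_mul]; omega
    rw [pv_foldl_set_range
        (fun x => images[(if k % 2 = 0 then k * gx + x else k * gx + (gx - 1 - x))]?)
        gx (k * gx) _ (by rw [hbl, show k * gx + gx = (k + 1) * gx from by ring]; exact hmul1)]
    rw [List.take_left' hflen, List.drop_append, List.drop_eq_nil_of_le (by omega),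
        hflen, show k * gx + gx - k * gx = gx from by omega, List.drop_replicate,
        List.flatMap_append, List.flatMap_cons, List.flatMap_nil]
    have hc : (gy - k) * gx - gx = (gy - (k + 1)) * gx := by
      rw [Nat.sub_mul gy (k + 1) gx, Nat.sub_mul gy k gx, Nat.add_mul, one_mul]
      omega
    rw [hc]
    simp [pvRowOpt, List.append_assoc]

-- Bool branch conditions of the ports, reduced to Nat parity
theorem pv_cond0 (y : Nat) : (PySem.Int.mod (y : Int) 2 == (0 : Int)) = decide (y % 2 = 0) := by
  rw [pv_mod2]
  rcases Nat.mod_two_eq_zero_or_one y with h | h <;> simp [h]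

theorem pv_cond1 (y : Nat) : (PySem.Int.mod (y : Int) 2 == (1 : Int)) = decide (y % 2 = 1) := by
  rw [pv_mod2]
  rcases Nat.mod_two_eq_zero_or_one y with h | h <;> simp [h]

-- A's port, on nonnegative grid dimensions, in closed form
theorem pv_A_eq (images : List Int) (gx gy : Nat) :
    reorder_images_zigzag_py images (gx : Int) (gy : Int)
      = ((List.range gy).flatMap (pvRowOpt images gx)).map (fun o => o.getD 0) := by
  have h1 : reorder_images_zigzag_py images (gx : Int) (gy : Int)
      = ((List.range gy).foldl (fun buf y => (List.range gx).foldl (fun b x =>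
            b.set (y * gx + x)
              (images[(if y % 2 = 0 then y * gx + x else y * gx + (gx - 1 - x))]?)) buf)
          (List.replicate (gx * gy) (none : Option Int))).map (fun o => o.getD 0) := by
    simp only [reorder_images_zigzag_py, PySem.List.pyRange_one, Int.sub_zero,
      Int.toNat_natCast, zero_add, List.foldl_map,
      show ((gx : Int) * (gy : Int)).toNat = gx * gy from by rw [← Nat.cast_mul, Int.toNat_natCast]]
    congr 1
    apply PySem.List.foldl_congr_mem
    intro buf y hy
    apply PySem.List.foldl_congr_mem
    intro b x hx
    rw [List.mem_range] at hx
    rw [pv_cond0]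
    have hc1 : (y : Int) * gx + x = ((y * gx + x : Nat) : Int) := by push_cast; ring
    have hc2 : ((gx - 1 - x : Nat) : Int) = (gx : Int) - 1 - x := by omega
    have hc3 : (y : Int) * gx + ((gx : Int) - 1 - x) = ((y * gx + (gx - 1 - x) : Nat) : Int) := by
      rw [← hc2]; push_cast; ring
    by_cases hp : y % 2 = 0
    · rw [if_pos (by simp [hp]), hc1, PySem.List.pySetD_natCast, PySem.List.pyGet?_natCast,
          if_pos hp]
    · rw [if_neg (by simp [hp]), hc3, hc1, PySem.List.pySetD_natCast, PySem.List.pyGet?_natCast,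
          if_neg hp]
  rw [h1, pv_bufInv images gx gy gy le_rfl]
  simp

-- B's port, on nonnegative grid dimensions, in closed form
theorem pv_B_eq (images : List Int) (gx gy : Nat) :
    reorder_images_zigzag_py_alt images (gx : Int) (gy : Int)
      = (List.range gy).flatMap (fun y =>
          if y % 2 = 1 then ((images.drop (y * gx)).take gx).reverse
          else (images.drop (y * gx)).take gx) := by
  simp only [reorder_images_zigzag_py_alt, PySem.List.pyRange_one, Int.sub_zero,
    Int.toNat_natCast, zero_add, List.foldl_map]
  rw [PySem.List.foldl_append_eq_flatMap, List.nil_append]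
  apply pv_flatMap_congr
  intro y _
  have hc1 : ((y : Int) + 1) * gx = (((y + 1) * gx : Nat) : Int) := by push_cast; ring
  have hc2 : (y : Int) * gx = ((y * gx : Nat) : Int) := by push_cast; ring
  rw [pv_cond1, hc1, hc2, PySem.List.slice_natCast,
    show (y + 1) * gx - y * gx = gx from by rw [Nat.add_mul, one_mul]; omega]
  by_cases hp : y % 2 = 1 <;> simp [hp]

-- the two row forms agree when the row lies inside the input
theorem pv_row_eq (images : List Int) (gx gy y : Nat) (hy : y < gy)
    (hlen : images.length = gx * gy) :
    (pvRowOpt images gx y).map (fun o => o.getD 0)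
      = if y % 2 = 1 then ((images.drop (y * gx)).take gx).reverse
        else (images.drop (y * gx)).take gx := by
  have hle : y * gx + gx ≤ images.length := by
    rw [hlen]
    calc y * gx + gx = (y + 1) * gx := by ring
      _ ≤ gy * gx := Nat.mul_le_mul_right gx hy
      _ = gx * gy := Nat.mul_comm _ _
  by_cases hp : y % 2 = 0
  · rw [if_neg (by omega)]
    simp only [pvRowOpt, hp, if_true]
    rw [pv_map_range_get images (y * gx) gx hle]
    simp [List.map_map, Function.comp_def]
  · rw [if_pos (by omega)]
    simp only [pvRowOpt, hp, if_false]
    rw [show (fun x => images[y * gx + (gx - 1 - x)]?)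
          = (fun x => (fun t => images[y * gx + t]?) (gx - 1 - x)) from rfl,
      pv_map_rev (fun t => images[y * gx + t]?) gx,
      pv_map_range_get images (y * gx) gx hle]
    simp [List.map_map, Function.comp_def]

-- ===== VERDICT (by name: the statement is the Claim_ definition above) =====
theorem reorder_images_zigzag_py_spec : Claim_equal_reorder_images_zigzag_py := by
  intro images grid_x grid_y _ hpre
  obtain ⟨hlen, hy⟩ := hpre
  unfold Spec_reorder_images_zigzag_py
  by_cases hgy : 0 ≤ grid_y
  · by_cases hgx : 0 ≤ grid_x
    · -- main case: both dimensions nonnegative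
      lift grid_x to ℕ using hgx with gx
      lift grid_y to ℕ using hgy with gy
      have hlenN : images.length = gx * gy := by exact_mod_cast hlen
      rw [pv_A_eq, pv_B_eq, List.map_flatMap]
      apply pv_flatMap_congr
      intro y hyr
      exact pv_row_eq images gx gy y (List.mem_range.mp hyr) hlenN
    · -- grid_x < 0 (so the grid is empty and images = [])
      have hprod : grid_x * grid_y = 0 :=
        le_antisymm (mul_nonpos_of_nonpos_of_nonneg (by omega) hgy)
          (by rw [← hlen]; positivity)
      have himg : images = [] := by
        rw [hprod] at hlen
        exact List.length_eq_zero_iff.mp (by exact_mod_cast hlen)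
      simp [reorder_images_zigzag_py, reorder_images_zigzag_py_alt, himg, hprod,
        PySem.List.pyRange_one (a := 0) (b := grid_x),
        Int.toNat_of_nonpos (show grid_x ≤ 0 from by omega),
        PySem.List.slice]
  · -- grid_y < 0: Pre_ forces images = [] and an empty result on both sides
    have himg : images = [] := hy.resolve_left hgy
    have hprod : grid_x * grid_y = 0 := by rw [← hlen, himg]; rfl
    simp [reorder_images_zigzag_py, reorder_images_zigzag_py_alt, himg, hprod,
      PySem.List.pyRange_one (a := 0) (b := grid_y),
      Int.toNat_of_nonpos (show grid_y ≤ 0 from by omega)]
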